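-- pv_equiv track=rewrite | github.com/lmarti-dev/qutlet | qutlet/utilities/generic.py | from_bitstring
-- ===== SOURCE A (Python) =====
-- from typing import Iterable, Union, Any
--
-- def binleftpad(integer: int, left_pad: int):
--     b = format(integer, "0{lp}b".format(lp=left_pad))
--     return b
--
-- def index_bits(
--     a: Union[str, int], N: int = None, ones=True, right_to_left: bool = False
-- ) -> list:
--     """Takes a binary number and returns a list of indices where the bit is one (or zero)
--     Args:
--         a (binary number): The binary number whose ones or zeroes will be indexed
--         ones (bool): If true, index ones. If false, index zeroes
--     Returns:
--         list: List of indices where a is one (or zero)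
--     """
--     if isinstance(a, int):
--         if N is None:
--             b = bin(a)
--         else:
--             b = binleftpad(integer=a, left_pad=N)
--     else:
--         b = a
--     if "b" in b:
--         b = b.split("b")[1]
--     if right_to_left:
--         b = list(reversed(b))
--     if ones:
--         return [idx for idx, v in enumerate(b) if int(v)]
--     elif not ones:
--         return [idx for idx, v in enumerate(b) if not int(v)]
--
-- def from_bitstring(b: str, n_qubits: int, right_to_left: bool = False) -> int:
--     if "b" in b:
--         b = b.split("b")[1]
--     # hmmmm would double rtl cancel out? too tired to think about it
--     # actually, you need index_bits to be rtl (because that's the order)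
--     # but you then need from_bitstring to be ltr because that's the indices
--     # it does cancel out
--     idx = index_bits(a=b, N=n_qubits, right_to_left=True)
--     if right_to_left:
--         return sum([2 ** (n_qubits - 1 - iii) for iii in idx])
--     else:
--         return sum([2**iii for iii in idx])
-- ===== SOURCE B (Python) =====
-- def from_bitstring(b: str, n_qubits: int, right_to_left: bool = False) -> int:
--     if "b" in b:
--         b = b.split("b")[1]
--     v = 0
--     for c in (reversed(b) if right_to_left else b):
--         v = 2 * v + (1 if int(c) else 0)
--     if not right_to_left:
--         return v
--     shift = n_qubits - len(b)
--     return v << shift if shift >= 0 else v >> (-shift)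
-- ===== Notes on version B (the rewrite author's own statement) =====
-- stated objective: alternative
-- what changed: Replaces the reverse+enumerate+index-list+power-sum pipeline with a single Horner-scheme fold (v = 2*v + bit) over the string plus one final shift for the right_to_left case; Pre_ excludes inputs where int(c) raises ValueError and the right_to_left inputs where a set bit gets a negative exponent, on which A returns a float instead of an int.
-- outside the precondition, e.g. on from_bitstring('1', 0, True): A returns 0.5, B returns 0; on from_bitstring('1x', 2, False): A raises ValueError, B raises ValueError
import Mathlib
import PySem

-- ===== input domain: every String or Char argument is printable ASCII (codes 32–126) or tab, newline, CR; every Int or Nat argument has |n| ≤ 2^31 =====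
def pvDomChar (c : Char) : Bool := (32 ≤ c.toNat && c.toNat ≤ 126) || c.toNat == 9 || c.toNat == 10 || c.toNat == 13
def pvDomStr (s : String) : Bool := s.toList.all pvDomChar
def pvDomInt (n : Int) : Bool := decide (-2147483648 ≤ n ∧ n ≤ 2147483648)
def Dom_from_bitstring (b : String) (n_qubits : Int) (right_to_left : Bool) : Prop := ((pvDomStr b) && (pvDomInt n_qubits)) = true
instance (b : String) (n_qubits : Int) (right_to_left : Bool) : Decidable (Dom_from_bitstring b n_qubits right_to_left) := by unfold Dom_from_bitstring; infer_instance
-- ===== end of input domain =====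

-- ===== PORT A =====
-- B replaces A's reverse+enumerate+index-list+power-sum pipeline by one Horner fold plus a final shift (alternative decomposition).

-- shared by both ports and Pre_: the `if "b" in b: b = b.split("b")[1]` step
def pvEff (l : List Char) : List Char :=
  if PySem.Chars.isIn ['b'] l then (PySem.Chars.splitOn l ['b']).getD 1 [] else l

-- int(v) on a single character; Pre_ keeps every character a digit, so the .getD default is never taken
def pvBit (c : Char) : Int := (PySem.Int.ofChars? [c]).getD 0

-- port of index_bits for the only shapes A reaches: `a` a string (so N is unused), step for step
def index_bits_p (a : List Char) (right_to_left : Bool) (ones : Bool) : List Int :=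
  let b := if PySem.Chars.isIn ['b'] a then (PySem.Chars.splitOn a ['b']).getD 1 [] else a
  let b := if right_to_left then b.reverse else b
  if ones then ((PySem.List.enumerate b 0).filter (fun p => pvBit p.2 != 0)).map (fun p => p.1)
  else ((PySem.List.enumerate b 0).filter (fun p => !(pvBit p.2 != 0))).map (fun p => p.1)

def from_bitstring (b : String) (n_qubits : Int) (right_to_left : Bool) : Int :=
  let bl := pvEff b.toList
  let idx := index_bits_p bl true true
  if right_to_left then
    -- 2 ** (n_qubits - 1 - iii): the exponent is ≥ 0 under Pre_ (a negative exponent makes A return a float, excluded)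
    (idx.map (fun iii => (2 : Int) ^ (n_qubits - 1 - iii).toNat)).sum
  else
    (idx.map (fun iii => (2 : Int) ^ iii.toNat)).sum

-- ===== PORT B =====
def from_bitstring_alt (b : String) (n_qubits : Int) (right_to_left : Bool) : Int :=
  let bl := pvEff b.toList
  let s := if right_to_left then bl.reverse else bl
  let v : Int := s.foldl (fun acc c => 2 * acc + (if pvBit c != 0 then 1 else 0)) 0
  if right_to_left then
    let shift := n_qubits - (bl.length : Int)
    if 0 ≤ shift then v <<< shift.toNat  -- Python's << on int is Lean's <<< (prelude-checked)
    else v >>> (-shift).toNat            -- Python's >> on int is Lean's >>> (prelude-checked)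
  else v

-- ===== PRECONDITION & SPEC =====
-- Pre_ admits exactly the inputs where A returns an int: every character of the effective string parses
-- as a digit (otherwise int(c) raises ValueError), and in the right_to_left case every set bit q of the
-- reversed effective string satisfies q ≤ n_qubits - 1 (otherwise 2**negative makes A return a float).
def Pre_from_bitstring (b : String) (n_qubits : Int) (right_to_left : Bool) : Prop :=
  ((pvEff b.toList).all PySem.Chars.isdigit = true) ∧
  (right_to_left = true → ∀ q, q < (pvEff b.toList).length →
      pvBit ((pvEff b.toList).reverse.getD q '0') ≠ 0 → (q : Int) ≤ n_qubits - 1)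
instance (b : String) (n_qubits : Int) (right_to_left : Bool) : Decidable (Pre_from_bitstring b n_qubits right_to_left) := by unfold Pre_from_bitstring; infer_instance

def pvWitness_from_bitstring : String × Int × Bool := ("11", 2, true)

def Spec_from_bitstring (b : String) (n_qubits : Int) (right_to_left : Bool) (out : Int) : Prop := out = from_bitstring_alt b n_qubits right_to_left
instance (b : String) (n_qubits : Int) (right_to_left : Bool) (out : Int) : Decidable (Spec_from_bitstring b n_qubits right_to_left out) := by unfold Spec_from_bitstring; infer_instance

-- ===== CLAIM (what is proved, stated in full; the proofs are below) =====
def Claim_equal_from_bitstring : Prop := ∀ (b : String) (n_qubits : Int) (right_to_left : Bool), Dom_from_bitstring b n_qubits right_to_left → Pre_from_bitstring b n_qubits right_to_left → Spec_from_bitstring b n_qubits right_to_left (from_bitstring b n_qubits right_to_left)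

-- ===== LEMMAS AND PROOFS =====

-- the index list A builds, at a general enumeration offset
def pvIdx (l : List Char) (s : Int) : List Int :=
  ((PySem.List.enumerate l s).filter (fun p => pvBit p.2 != 0)).map (fun p => p.1)

-- MSB-first binary value of a character list (what B's Horner fold computes)
def pvVal : List Char → Int
  | [] => 0
  | c :: t => (if pvBit c != 0 then (2 : Int) ^ t.length else 0) + pvVal t

-- LSB-first binary value
def pvD : List Char → Int
  | [] => 0
  | c :: t => (if pvBit c != 0 then (1 : Int) else 0) + 2 * pvD t

lemma pvIdx_nil (s : Int) : pvIdx [] s = [] := rfl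

lemma pvIdx_cons (c : Char) (t : List Char) (s : Int) :
    pvIdx (c :: t) s = (if pvBit c != 0 then [s] else []) ++ pvIdx t (s + 1) := by
  simp [pvIdx, PySem.List.enumerate_cons]
  split <;> simp_all

lemma horner_eq (l : List Char) (a : Int) :
    l.foldl (fun acc c => 2 * acc + (if pvBit c != 0 then 1 else 0)) a
      = a * 2 ^ l.length + pvVal l := by
  induction l generalizing a with
  | nil => simp [pvVal]
  | cons c t ih =>
      simp only [List.foldl_cons, ih, pvVal, List.length_cons]
      split <;> ring

lemma pvD_append (xs ys : List Char) :
    pvD (xs ++ ys) = pvD xs + 2 ^ xs.length * pvD ys := by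
  induction xs with
  | nil => simp [pvD]
  | cons c t ih => simp only [List.cons_append, pvD, ih, List.length_cons]; ring

lemma pvD_reverse (l : List Char) : pvD l.reverse = pvVal l := by
  induction l with
  | nil => rfl
  | cons c t ih =>
      simp only [List.reverse_cons, pvD_append, ih, pvVal, List.length_reverse, pvD]
      split <;> ring

-- A's ltr sum over the index list equals 2^k times the LSB-first value
lemma sum_ltr (l : List Char) (k : Nat) :
    ((pvIdx l (k : Int)).map (fun iii => (2 : Int) ^ iii.toNat)).sum = 2 ^ k * pvD l := by
  induction l generalizing k with
  | nil => simp [pvIdx_nil, pvD]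
  | cons c t ih =>
      have h1 : ((k : Int) + 1) = ((k + 1 : Nat) : Int) := by push_cast; ring
      rw [pvIdx_cons, List.map_append, List.sum_append, h1, ih (k + 1)]
      by_cases hb : (pvBit c != 0) = true
      · simp only [pvD, if_pos hb, List.map_cons, List.map_nil, List.sum_cons, List.sum_nil,
          Int.toNat_natCast, pow_succ]
        ring
      · simp only [pvD, if_neg hb, List.map_nil, List.sum_nil, pow_succ]
        ring

-- A's rtl sum, case n_qubits ≥ offset + length
lemma sum_rtl_ge (l : List Char) (k : Nat) (n : Int)
    (hset : ∀ q, (hq : q < l.length) → pvBit l[q] ≠ 0 → (k : Int) + q ≤ n - 1)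
    (hn : (k : Int) + l.length ≤ n) :
    ((pvIdx l (k : Int)).map (fun iii => (2 : Int) ^ (n - 1 - iii).toNat)).sum
      = 2 ^ (n - (k : Int) - l.length).toNat * pvVal l := by
  induction l generalizing k with
  | nil => simp [pvIdx_nil, pvVal]
  | cons c t ih =>
      have h1 : ((k : Int) + 1) = ((k + 1 : Nat) : Int) := by push_cast; ring
      have hset' : ∀ q, (hq : q < t.length) → pvBit t[q] ≠ 0 → ((k + 1 : Nat) : Int) + q ≤ n - 1 := by
        intro q hq hb
        have := hset (q + 1) (by simpa using Nat.succ_lt_succ hq) (by simpa using hb)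
        push_cast at this ⊢; omega
      have hn' : ((k + 1 : Nat) : Int) + t.length ≤ n := by
        push_cast at hn ⊢; simp [List.length_cons] at hn; omega
      have e2 : n - (k : Int) - ((t.length + 1 : Nat) : Int)
          = n - ((k + 1 : Nat) : Int) - (t.length : Int) := by push_cast; ring
      rw [pvIdx_cons, List.map_append, List.sum_append, h1, ih (k + 1) hset' hn']
      simp only [List.length_cons, e2]
      by_cases hb : (pvBit c != 0) = true
      · have hb' : pvBit c ≠ 0 := by simpa using hb
        have hk := hset 0 (by simp) (by simpa using hb')
        have e1 : (n - 1 - (k : Int)).toNat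
            = (n - ((k + 1 : Nat) : Int) - (t.length : Int)).toNat + t.length := by
          push_cast at hk hn' ⊢; omega
        simp only [pvVal, if_pos hb, List.map_cons, List.map_nil, List.sum_cons, List.sum_nil,
          e1, pow_add]
        ring
      · simp only [pvVal, if_neg hb, List.map_nil, List.sum_nil]
        ring

-- A's rtl sum, case n_qubits ≤ offset + length: the sum times 2^(k+len-n) recovers the MSB-first value
lemma sum_rtl_le (l : List Char) (k : Nat) (n : Int)
    (hset : ∀ q, (hq : q < l.length) → pvBit l[q] ≠ 0 → (k : Int) + q ≤ n - 1)
    (hn : n ≤ (k : Int) + l.length) :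
    ((pvIdx l (k : Int)).map (fun iii => (2 : Int) ^ (n - 1 - iii).toNat)).sum
        * 2 ^ ((k : Int) + l.length - n).toNat = pvVal l := by
  induction l generalizing k with
  | nil => simp [pvIdx_nil, pvVal]
  | cons c t ih =>
      have h1 : ((k : Int) + 1) = ((k + 1 : Nat) : Int) := by push_cast; ring
      have hset' : ∀ q, (hq : q < t.length) → pvBit t[q] ≠ 0 → ((k + 1 : Nat) : Int) + q ≤ n - 1 := by
        intro q hq hb
        have := hset (q + 1) (by simpa using Nat.succ_lt_succ hq) (by simpa using hb)
        push_cast at this ⊢; omega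
      have hn' : n ≤ ((k + 1 : Nat) : Int) + t.length := by
        push_cast at hn ⊢; simp [List.length_cons] at hn; omega
      have eE : (k : Int) + ((t.length + 1 : Nat) : Int) - n
          = ((k + 1 : Nat) : Int) + (t.length : Int) - n := by push_cast; ring
      rw [pvIdx_cons, List.map_append, List.sum_append, add_mul, h1]
      simp only [List.length_cons, eE]
      rw [ih (k + 1) hset' hn']
      by_cases hb : (pvBit c != 0) = true
      · have hb' : pvBit c ≠ 0 := by simpa using hb
        have hk := hset 0 (by simp) (by simpa using hb')
        have e1 : (n - 1 - (k : Int)).toNat + (((k + 1 : Nat) : Int) + (t.length : Int) - n).toNat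
            = t.length := by push_cast at hk hn' ⊢; omega
        simp only [pvVal, if_pos hb, List.map_cons, List.map_nil, List.sum_cons, List.sum_nil]
        rw [add_zero, ← pow_add, e1]
      · simp only [pvVal, if_neg hb, List.map_nil, List.sum_nil]
        ring

-- bridge: the positional hypothesis of Pre_ in getElem form
lemma pre_to_getElem (r : List Char) (n : Int)
    (h : ∀ q, q < r.length → pvBit (r.getD q '0') ≠ 0 → (q : Int) ≤ n - 1) :
    ∀ q, (hq : q < r.length) → pvBit r[q] ≠ 0 → (0 : Int) + q ≤ n - 1 := by
  intro q hq hb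
  have := h q hq (by rwa [List.getD_eq_getElem r '0' hq])
  omega

-- under Pre_'s digit condition the effective string contains no 'b', so index_bits' own split is a no-op
lemma eff_no_b (e : List Char) (hdig : ∀ c ∈ e, PySem.Chars.isdigit c = true) :
    PySem.Chars.isIn ['b'] e = false := by
  rw [PySem.Chars.isIn_eq_false_iff]
  intro hi
  have hb : 'b' ∈ e := hi.subset (by simp)
  have := hdig 'b' hb
  simp [PySem.Chars.isdigit] at this

-- ===== VERDICT (by name: the statement is the Claim_ definition above) =====
theorem from_bitstring_spec : Claim_equal_from_bitstring := by
  intro b n rtl hdom hpre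
  obtain ⟨hdig, hrtl⟩ := hpre
  set e := pvEff b.toList with he
  have heff : (if PySem.Chars.isIn ['b'] e = true then
      (PySem.Chars.splitOn e ['b']).getD 1 [] else e) = e := by
    rw [eff_no_b e (by simpa [List.all_eq_true] using hdig)]; simp
  unfold Spec_from_bitstring from_bitstring from_bitstring_alt index_bits_p
  rw [← he]
  simp only [heff]
  have hidx : (((PySem.List.enumerate e.reverse 0).filter (fun p => pvBit p.2 != 0)).map
      (fun p => p.1)) = pvIdx e.reverse ((0 : Nat) : Int) := by
    simp [pvIdx]
  cases rtl with
  | false =>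
      simp only [Bool.false_eq_true, ite_false, if_true, hidx]
      rw [sum_ltr, horner_eq, pvD_reverse]
      simp
  | true =>
      simp only [if_true, hidx]
      have hset : ∀ q, (hq : q < e.reverse.length) → pvBit e.reverse[q] ≠ 0 →
          ((0 : Nat) : Int) + q ≤ n - 1 := by
        apply pre_to_getElem
        intro q hq hb
        exact hrtl rfl q (by simpa using hq) (by simpa using hb)
      rw [horner_eq]
      simp only [zero_mul, zero_add]
      by_cases hsh : 0 ≤ n - (e.length : Int)
      · rw [if_pos hsh, sum_rtl_ge e.reverse 0 n hset (by simpa using hsh)]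
        have : (n - ((0 : Nat) : Int) - (e.reverse.length : Int)).toNat
            = (n - (e.length : Int)).toNat := by simp
        rw [this, Int.shiftLeft_eq, mul_comm]
      · rw [if_neg hsh, ← sum_rtl_le e.reverse 0 n hset (by simp at hsh ⊢; omega)]
        have hm : (((0 : Nat) : Int) + (e.reverse.length : Int) - n).toNat
            = (-(n - (e.length : Int))).toNat := by
          simp only [Nat.cast_zero, zero_add, List.length_reverse]
          omega
        rw [hm, Int.shiftRight_eq_div_pow]
        push_cast
        exact (Int.mul_ediv_cancel _ (pow_ne_zero _ (by norm_num))).symm
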